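-- pv_equiv track=rewrite | github.com/SubasAd/Handwritten-Devanagari-Recognition-System | Devanagari in jupyter/SegmentationCharacter.py | find_discontinuities
-- ===== SOURCE A (Python) =====
-- def find_discontinuities(nums):
--     start = end = None
--     discontinuities = []
--
--     for i in range(len(nums) - 1):
--         if nums[i + 1] != nums[i] + 1:
--             if start is None:
--                 start = nums[i]
--             end = nums[i + 1]
--         else:
--             if start is not None:
--                 discontinuities.append((start, end))
--                 start = end = None
--
--     # If the loop ends with a discontinuity
--     if start is not None:
--         discontinuities.append((start, end))
--     finaldiscontinuities = []
--     for each in discontinuities: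
--         if each[1] - each[0] > 3:
--             finaldiscontinuities.append(each)
--
--     return finaldiscontinuities
-- ===== SOURCE B (Python) =====
-- def find_discontinuities(nums):
--     # Two-phase: collect gap indices, group maximal consecutive runs, map & filter.
--     gaps = [i for i in range(len(nums) - 1) if nums[i + 1] != nums[i] + 1]
--     runs = []  # each run stored as [first_index, last_index]
--     for i in gaps:
--         if runs and i == runs[-1][1] + 1:
--             runs[-1][1] = i
--         else:
--             runs.append([i, i])
--     pairs = [(nums[f], nums[l + 1]) for f, l in runs]
--     return [p for p in pairs if p[1] - p[0] > 3]
-- ===== Notes on version B (the rewrite author's own statement) =====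
-- stated objective: alternative
-- what changed: Replaces A's carried start/end state machine with a two-phase decomposition: first collect gap-boundary indices, then group maximal runs of consecutive indices and map each run to its (start,end) pair before filtering by size.
import Mathlib
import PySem

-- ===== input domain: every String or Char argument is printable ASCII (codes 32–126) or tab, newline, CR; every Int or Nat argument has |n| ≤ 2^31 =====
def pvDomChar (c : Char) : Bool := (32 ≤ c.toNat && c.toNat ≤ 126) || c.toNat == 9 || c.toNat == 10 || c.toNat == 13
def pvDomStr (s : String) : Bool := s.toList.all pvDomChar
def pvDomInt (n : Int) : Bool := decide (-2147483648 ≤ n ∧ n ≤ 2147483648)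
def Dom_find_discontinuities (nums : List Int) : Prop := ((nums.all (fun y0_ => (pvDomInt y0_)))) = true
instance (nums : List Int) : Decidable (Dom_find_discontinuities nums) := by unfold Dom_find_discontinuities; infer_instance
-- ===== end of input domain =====

-- B replaces A's carried start/end state machine with a two-phase decomposition
-- (collect gap indices, group consecutive runs, map & filter); alternative, same cost.


-- ===== PORT A =====
-- loop body of A; indices drawn from range(len(nums)-1) are always in bounds, so
-- nums.getD i 0 is exact for Python's nums[i]; e.getD 0 never uses its default
-- (end is always set when start is).
def stepA (nums : List Int) (st : Option Int × Option Int × List (Int × Int)) (i : Nat) :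
    Option Int × Option Int × List (Int × Int) :=
  match st with
  | (s, e, disc) =>
    if nums.getD (i + 1) 0 ≠ nums.getD i 0 + 1 then
      (some (s.getD (nums.getD i 0)), some (nums.getD (i + 1) 0), disc)
    else
      match s with
      | some a => (none, none, disc ++ [(a, e.getD 0)])
      | none => (s, e, disc)

def find_discontinuities (nums : List Int) : List (Int × Int) :=
  let st := (List.range (nums.length - 1)).foldl (stepA nums) (none, none, [])
  let disc : List (Int × Int) :=
    match st.1 with
    | some a => st.2.2 ++ [(a, st.2.1.getD 0)]
    | none => st.2.2
  disc.foldl (fun acc p => if p.2 - p.1 > 3 then acc ++ [p] else acc) []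

-- ===== PORT B =====
-- one step of B's run-grouping loop: extend the last run or open a new one
def stepRun (runs : List (Nat × Nat)) (i : Nat) : List (Nat × Nat) :=
  match runs.getLast? with
  | some (f, l) => if i = l + 1 then runs.dropLast ++ [(f, i)] else runs ++ [(i, i)]
  | none => [(i, i)]

def find_discontinuities_alt (nums : List Int) : List (Int × Int) :=
  let gaps := (List.range (nums.length - 1)).filter
    (fun i => nums.getD (i + 1) 0 ≠ nums.getD i 0 + 1)
  let runs := gaps.foldl stepRun []
  let pairs := runs.map (fun r => (nums.getD r.1 0, nums.getD (r.2 + 1) 0))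
  pairs.filter (fun p => p.2 - p.1 > 3)

-- ===== PRECONDITION & SPEC =====
def Spec_find_discontinuities (nums : List Int) (out : List (Int × Int)) : Prop := out = find_discontinuities_alt nums
instance (nums : List Int) (out : List (Int × Int)) : Decidable (Spec_find_discontinuities nums out) := by unfold Spec_find_discontinuities; infer_instance

-- ===== CLAIM (what is proved, stated in full; the proofs are below) =====
def Claim_equal_find_discontinuities : Prop := ∀ (nums : List Int), Dom_find_discontinuities nums → Spec_find_discontinuities nums (find_discontinuities nums)

-- ===== LEMMAS AND PROOFS =====

def toPair (nums : List Int) (r : Nat × Nat) : Int × Int :=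
  (nums.getD r.1 0, nums.getD (r.2 + 1) 0)

-- invariant relating A's loop state after m steps to B's grouped runs of the
-- gap indices below m
def LoopInv (nums : List Int) (m : Nat) (st : Option Int × Option Int × List (Int × Int))
    (runs : List (Nat × Nat)) : Prop :=
  match st with
  | (none, e, disc) =>
      e = none ∧ disc = runs.map (toPair nums) ∧ (∀ p ∈ runs.getLast?, p.2 + 1 < m)
  | (some a, e, disc) =>
      ∃ cl first last, runs = cl ++ [(first, last)] ∧ last + 1 = m ∧
        a = nums.getD first 0 ∧ e = some (nums.getD m 0) ∧ disc = cl.map (toPair nums)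

lemma invA (nums : List Int) (m : Nat) :
    LoopInv nums m ((List.range m).foldl (stepA nums) (none, none, []))
      (((List.range m).filter
          (fun i => nums.getD (i + 1) 0 ≠ nums.getD i 0 + 1)).foldl stepRun []) := by
  induction m with
  | zero => simp [LoopInv]
  | succ m ih =>
    rw [List.range_succ, List.foldl_append, List.filter_append]
    set st := (List.range m).foldl (stepA nums) (none, none, []) with hst
    set runs := (((List.range m).filter
        (fun i => nums.getD (i + 1) 0 ≠ nums.getD i 0 + 1)).foldl stepRun []) with hruns
    by_cases hflag : nums.getD (m + 1) 0 = nums.getD m 0 + 1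
    · -- no gap at m
      have hf : (nums[m + 1]?).getD 0 = (nums[m]?).getD 0 + 1 := by simpa using hflag
      have hone : (List.filter (fun i => decide (nums.getD (i + 1) 0 ≠ nums.getD i 0 + 1)) [m])
          = [] := by simp [hf]
      rw [hone, List.append_nil, List.foldl_cons, List.foldl_nil]
      obtain ⟨s, e, disc⟩ := st
      match s with
      | none =>
          obtain ⟨he, hd, hl⟩ := ih
          have hstep : stepA nums (none, e, disc) m = (none, e, disc) := by
            simp [stepA, hf]
          rw [hstep]
          refine ⟨he, hd, ?_⟩
          intro p hp; exact Nat.lt_succ_of_lt (hl p hp)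
      | some a =>
          obtain ⟨cl, first, last, hr, hlm, ha, he, hd⟩ := ih
          have hstep : stepA nums (some a, e, disc) m
              = (none, none, disc ++ [(a, e.getD 0)]) := by
            simp [stepA, hf]
          rw [hstep]
          refine ⟨rfl, ?_, ?_⟩
          · rw [← hruns, hr, List.map_append, List.map]
            have hpair : (a, e.getD 0) = toPair nums (first, last) := by
              simp [toPair, ha, he, ← hlm]
            simp [hpair, hd]
          · intro p hp
            rw [← hruns, hr] at hp
            simp only [List.getLast?_concat, Option.mem_def, Option.some.injEq] at hp
            obtain rfl := hp.symm
            show last + 1 < m + 1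
            omega
    · -- gap at m
      have hf : ¬ ((nums[m + 1]?).getD 0 = (nums[m]?).getD 0 + 1) := by simpa using hflag
      have hone : (List.filter (fun i => decide (nums.getD (i + 1) 0 ≠ nums.getD i 0 + 1)) [m])
          = [m] := by simp [hf]
      rw [hone, List.foldl_append, List.foldl_cons, List.foldl_nil]
      obtain ⟨s, e, disc⟩ := st
      match s with
      | none =>
          obtain ⟨he, hd, hl⟩ := ih
          have hstep : stepA nums (none, e, disc) m
              = (some (nums.getD m 0), some (nums.getD (m + 1) 0), disc) := by
            simp [stepA, hf]
          rw [hstep]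
          refine ⟨runs, m, m, ?_, rfl, rfl, rfl, hd⟩
          -- stepRun runs m = runs ++ [(m, m)]
          rw [← hruns]
          match hg : runs.getLast? with
          | none =>
              have h0 : runs = [] := List.getLast?_eq_none_iff.mp hg
              simp [stepRun, hg, h0]
          | some (f, l) =>
              have hlt : l + 1 < m := by
                have := hl (f, l) (by simp [hg]); simpa using this
              have hne : m ≠ l + 1 := by omega
              simp [stepRun, hg, hne]
      | some a =>
          obtain ⟨cl, first, last, hr, hlm, ha, he, hd⟩ := ih
          have hstep : stepA nums (some a, e, disc) m
              = (some a, some (nums.getD (m + 1) 0), disc) := by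
            simp [stepA, hf]
          rw [hstep]
          refine ⟨cl, first, m, ?_, rfl, ha, rfl, hd⟩
          -- stepRun extends the active run
          rw [← hruns, hr]
          simp [stepRun, hlm]

-- A's final filter loop is List.filter
lemma foldl_filter (l init : List (Int × Int)) :
    l.foldl (fun acc x => if x.2 - x.1 > 3 then acc ++ [x] else acc) init
      = init ++ l.filter (fun x => x.2 - x.1 > 3) := by
  induction l generalizing init with
  | nil => simp
  | cons x xs ih =>
      simp only [List.foldl_cons, List.filter_cons]
      by_cases h : x.2 - x.1 > 3
      · rw [if_pos h, ih, if_pos (by simpa using h)]; simp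
      · rw [if_neg h, ih, if_neg (by simpa using h)]

-- ===== VERDICT (by name: the statement is the Claim_ definition above) =====
theorem find_discontinuities_spec : Claim_equal_find_discontinuities := by
  intro nums _
  unfold Spec_find_discontinuities find_discontinuities find_discontinuities_alt
  have h := invA nums (nums.length - 1)
  set st := (List.range (nums.length - 1)).foldl (stepA nums) (none, none, []) with hst
  set runs := (((List.range (nums.length - 1)).filter
      (fun i => nums.getD (i + 1) 0 ≠ nums.getD i 0 + 1)).foldl stepRun []) with hruns
  have hdisc : (match st.1 with
      | some a => st.2.2 ++ [(a, st.2.1.getD 0)]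
      | none => st.2.2) = runs.map (toPair nums) := by
    obtain ⟨s, e, disc⟩ := st
    match s with
    | none => exact h.2.1
    | some a =>
        obtain ⟨cl, first, last, hr, hlm, ha, he, hd⟩ := h
        simp only [hd, hr, List.map_append, List.map]
        have : (a, (e.getD 0)) = toPair nums (first, last) := by
          simp [toPair, ha, he, ← hlm]
        simp [this]
  have htp : toPair nums = fun r : Nat × Nat => ((nums.getD r.1 0 : Int), nums.getD (r.2 + 1) 0) := by
    funext r; rfl
  simp only [hdisc, foldl_filter, List.nil_append, List.filter_map, hruns, htp, decide_not]
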